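-- pv_equiv track=rewrite | github.com/Patkinwings/Hands-of-the-Monster | simulation.py | detect_straights
-- ===== SOURCE A (Python) =====
-- from typing import List, Tuple, Dict, Set, Any
--
-- def detect_straights(values: List[int]) -> List[List[int]]:
--     """Helper method to detect straight patterns."""
--     patterns = []
--     for i in range(len(values) - 3):
--         window = values[i:i+5]
--         gaps = sum(window[j] - window[j+1] - 1 for j in range(len(window)-1) if j+1 < len(window))
--         if gaps == 0:
--             patterns.append(window)
--         elif gaps == 1 and len(window) >= 4:
--             patterns.append(window)
--     return patterns
-- ===== SOURCE B (Python) =====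
-- def detect_straights(values):
--     """One zip pass over the full (length-5) windows -- a window qualifies iff
--     first - last - 4, the telescoped total gap, is 0 or 1 -- followed by a
--     separate check of the single trailing length-4 window."""
--     n = len(values)
--     patterns = []
--     if n < 4:
--         return patterns
--     for i, (first, last) in enumerate(zip(values, values[4:])):
--         if 0 <= first - last - 4 <= 1:
--             patterns.append(values[i:i+5])
--     d = values[n-4] - values[n-1] - 3
--     if d == 0 or d == 1:
--         patterns.append(values[n-4:])
--     return patterns
-- ===== Notes on version B (the rewrite author's own statement) =====
-- stated objective: faster
-- what changed: B replaces A's index loop with its inner gap-sum comprehension by a single enumerate/zip pass pairing each element with the one four places ahead (a full window qualifies iff first - last - 4, the telescoped total gap, is 0 or 1), plus one separate closed-form check of the trailing length-4 window.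
import Mathlib
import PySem

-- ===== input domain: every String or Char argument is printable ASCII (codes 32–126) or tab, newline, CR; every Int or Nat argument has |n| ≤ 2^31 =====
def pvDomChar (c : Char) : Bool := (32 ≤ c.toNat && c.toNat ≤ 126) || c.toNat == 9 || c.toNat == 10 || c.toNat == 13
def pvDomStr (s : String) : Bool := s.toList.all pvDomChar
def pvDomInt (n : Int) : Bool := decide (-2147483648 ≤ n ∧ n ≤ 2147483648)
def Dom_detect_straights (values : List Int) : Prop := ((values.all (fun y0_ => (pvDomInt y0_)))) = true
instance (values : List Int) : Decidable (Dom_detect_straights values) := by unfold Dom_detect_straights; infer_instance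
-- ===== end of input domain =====

-- B replaces the per-window gap-sum by one enumerate/zip pass using the telescoped closed form first - last - 4, plus a separate trailing-window check (measured faster); same return value on all inputs.

-- ===== PORT A =====
-- window indices are always in range inside the loop, so pyGetD is exact here
def detect_straights (values : List Int) : List (List Int) :=
  (PySem.List.pyRange 0 ((values.length : Int) - 3) 1).foldl (fun patterns i =>
    let window := PySem.List.slice values (some i) (some (i + 5))
    let gaps := (PySem.List.pyRange 0 ((window.length : Int) - 1) 1).foldl (fun s j =>
        if j + 1 < (window.length : Int) then
          s + (PySem.List.pyGetD window j 0 - PySem.List.pyGetD window (j + 1) 0 - 1)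
        else s) 0
    if gaps = 0 then patterns ++ [window]
    else if gaps = 1 ∧ 4 ≤ window.length then patterns ++ [window]
    else patterns) []

-- ===== PORT B =====
-- one enumerate/zip pass over the full windows, then the trailing length-4 window;
-- all indices are in range when reached (n ≥ 4), so pyGetD is exact
def detect_straights_alt (values : List Int) : List (List Int) :=
  let n := values.length
  if n < 4 then []
  else
    let patterns :=
      (PySem.List.enumerate (values.zip (PySem.List.slice values (some 4) none)) 0).foldl
        (fun patterns p =>
          if 0 ≤ p.2.1 - p.2.2 - 4 ∧ p.2.1 - p.2.2 - 4 ≤ 1 then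
            patterns ++ [PySem.List.slice values (some p.1) (some (p.1 + 5))]
          else patterns) []
    let d := PySem.List.pyGetD values ((n : Int) - 4) 0 - PySem.List.pyGetD values ((n : Int) - 1) 0 - 3
    if d = 0 ∨ d = 1 then patterns ++ [PySem.List.slice values (some ((n : Int) - 4)) none]
    else patterns

-- ===== PRECONDITION & SPEC =====
def Spec_detect_straights (values : List Int) (out : List (List Int)) : Prop := out = detect_straights_alt values
instance (values : List Int) (out : List (List Int)) : Decidable (Spec_detect_straights values out) := by unfold Spec_detect_straights; infer_instance

-- ===== CLAIM =====
def Claim_equal_detect_straights : Prop := ∀ (values : List Int), Dom_detect_straights values → Spec_detect_straights values (detect_straights values)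

-- ===== LEMMAS AND PROOFS =====

-- the telescoped gap of a window (B's closed form), and the keep-test, as proof-side abbreviations
def pvD (w : List Int) : Int :=
  PySem.List.pyGetD w 0 0 - PySem.List.pyGetD w (-1) 0 - ((w.length : Int) - 1)

def pvCond (w : List Int) : Bool := (pvD w == 0) || (pvD w == 1)

-- common characterisation: the kept windows, indexed over List.range
def pvF (l : List Int) : List (List Int) :=
  ((List.range (l.length - 3)).filter (fun k => pvCond ((l.drop k).take 5))).map
    (fun k => (l.drop k).take 5)

-- telescoping: sum over range m of (g k - g (k+1) - 1) = g 0 - g m - m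
theorem pv_telescope (g : Nat → Int) (m : Nat) :
    ((List.range m).map (fun k => g k - g (k + 1) - 1)).sum = g 0 - g m - m := by
  induction m with
  | zero => simp
  | succ m ih =>
    rw [List.range_succ, List.map_append, List.sum_append, ih]
    push_cast
    simp
    ring

-- the guarded inner fold of port A equals the closed form pvD on any window of length ≥ 4
theorem pv_gaps (w : List Int) (hw : 4 ≤ w.length) :
    (PySem.List.pyRange 0 ((w.length : Int) - 1) 1).foldl (fun s j =>
        if j + 1 < (w.length : Int) then
          s + (PySem.List.pyGetD w j 0 - PySem.List.pyGetD w (j + 1) 0 - 1)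
        else s) 0
    = pvD w := by
  have hne : w ≠ [] := by intro h; rw [h] at hw; simp at hw
  rw [PySem.List.foldl_congr_mem _ _
      (fun s j => s + (PySem.List.pyGetD w j 0 - PySem.List.pyGetD w (j + 1) 0 - 1)) 0 ?_]
  · rw [PySem.List.foldl_add, PySem.List.pyRange_one, List.map_map]
    have hm : (((w.length : Int) - 1) - 0).toNat = w.length - 1 := by omega
    rw [hm]
    have hc : ∀ k : Nat, ((k : Int) + 1) = (((k + 1 : Nat)) : Int) := by intro k; push_cast; ring
    simp only [Function.comp_def, zero_add, hc, PySem.List.pyGetD_natCast]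
    rw [pv_telescope (fun k => w.getD k 0) (w.length - 1)]
    unfold pvD
    rw [PySem.List.pyGetD_zero, PySem.List.pyGetD_neg_one w 0 hne]
    have h1 : w.length - 1 < w.length := by omega
    rw [List.getD_eq_getElem w 0 h1, List.getLast_eq_getElem]
    push_cast [Nat.cast_sub (by omega : 1 ≤ w.length)]
    ring
  · intro acc j hj
    rw [PySem.List.mem_pyRange_one] at hj
    rw [if_pos (by omega)]

theorem pv_window_len (l : List Int) (k : Nat) (hk : k < l.length - 3) :
    4 ≤ ((l.drop k).take 5).length := by
  simp [List.length_take, List.length_drop]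
  omega

-- A's slice at a natural index is the drop/take window
theorem pv_slice (l : List Int) (k : Nat) :
    PySem.List.slice l (some (k : Int)) (some ((k : Int) + 5)) = (l.drop k).take 5 := by
  have h5 : ((k : Int) + 5) = ((k + 5 : Nat) : Int) := by push_cast; ring
  rw [h5, PySem.List.slice_natCast]
  congr 1
  omega

-- port A computes pvF
theorem pv_A_eq (l : List Int) : detect_straights l = pvF l := by
  unfold detect_straights
  rw [PySem.List.pyRange_one, List.foldl_map]
  have hm : (((l.length : Int) - 3) - 0).toNat = l.length - 3 := by omega
  rw [hm]
  rw [PySem.List.foldl_congr_mem _ _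
      (fun (acc : List (List Int)) (k : Nat) =>
        if pvCond ((l.drop k).take 5) then acc ++ [(l.drop k).take 5] else acc) [] ?_]
  · rw [PySem.List.foldl_append_if]
    simp [pvF]
  · intro acc k hk
    rw [List.mem_range] at hk
    simp only [zero_add]
    rw [pv_slice l k, pv_gaps _ (pv_window_len l k hk)]
    have hlen := pv_window_len l k hk
    by_cases h0 : pvD ((l.drop k).take 5) = 0
    · rw [if_pos h0, if_pos (by simp [pvCond, h0])]
    · rw [if_neg h0]
      by_cases h1 : pvD ((l.drop k).take 5) = 1
      · rw [if_pos ⟨h1, hlen⟩, if_pos (by simp [pvCond, h1])]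
      · rw [if_neg (by tauto), if_neg (by simp [pvCond, h0, h1])]

-- pvD of a full (length-5) window, in terms of the base list
theorem pv_q5 (l : List Int) (k : Nat) (hk : k + 5 ≤ l.length) :
    pvD ((l.drop k).take 5) = l.getD k 0 - l.getD (k + 4) 0 - 4 := by
  have hlw : ((l.drop k).take 5).length = 5 := by
    simp [List.length_take, List.length_drop]; omega
  have hne : (l.drop k).take 5 ≠ [] := by
    intro h; rw [h] at hlw; simp at hlw
  unfold pvD
  rw [PySem.List.pyGetD_zero, PySem.List.pyGetD_neg_one _ 0 hne, hlw,
      List.getLast_eq_getElem, List.getD_eq_getElem _ 0 (n := 0) (by omega),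
      List.getD_eq_getElem l 0 (n := k) (by omega), List.getD_eq_getElem l 0 (n := k + 4) (by omega)]
  simp only [hlw]
  rw [List.getElem_take, List.getElem_take, List.getElem_drop, List.getElem_drop]
  norm_num

-- pvD of the trailing length-4 window, in terms of the base list
theorem pv_q4 (l : List Int) (hk : 4 ≤ l.length) :
    pvD (l.drop (l.length - 4)) = l.getD (l.length - 4) 0 - l.getD (l.length - 1) 0 - 3 := by
  have hlw : (l.drop (l.length - 4)).length = 4 := by simp [List.length_drop]; omega
  have hne : l.drop (l.length - 4) ≠ [] := by
    intro h; rw [h] at hlw; simp at hlw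
  unfold pvD
  rw [PySem.List.pyGetD_zero, PySem.List.pyGetD_neg_one _ 0 hne, hlw,
      List.getLast_eq_getElem, List.getD_eq_getElem _ 0 (n := 0) (by omega),
      List.getD_eq_getElem l 0 (n := l.length - 4) (by omega),
      List.getD_eq_getElem l 0 (n := l.length - 1) (by omega)]
  simp only [hlw]
  rw [List.getElem_drop, List.getElem_drop]
  have h3 : l.length - 4 + 3 = l.length - 1 := by omega
  have h0 : l.length - 4 + 0 = l.length - 4 := by omega
  simp only [h3, h0]
  norm_num

-- the keep-test as pvCond
theorem pv_cond_iff (w : List Int) : (pvD w = 0 ∨ pvD w = 1) ↔ pvCond w = true := by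
  simp [pvCond]

-- port B computes pvF
theorem pv_B_eq (l : List Int) : detect_straights_alt l = pvF l := by
  unfold detect_straights_alt
  dsimp only
  by_cases h4 : l.length < 4
  · rw [if_pos h4]
    unfold pvF
    have h0 : l.length - 3 = 0 := by omega
    rw [h0]
    rfl
  · rw [if_neg h4]
    have hn : 4 ≤ l.length := by omega
    have hs4 : PySem.List.slice l (some 4) none = l.drop 4 := by simp [pysem]
    have hlz : (l.zip (l.drop 4)).length = l.length - 4 := by
      simp [List.length_zip, List.length_drop]
    rw [hs4, PySem.List.enumerate_eq_map_pyRange _ ((0 : Int), (0 : Int)), List.foldl_map]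
    rw [show PySem.List.len (l.zip (l.drop 4)) = ((l.length - 4 : Nat) : Int) by
      simp [PySem.List.len_eq, hlz]]
    rw [PySem.List.pyRange_one]
    have hm : (((l.length - 4 : Nat) : Int) - 0).toNat = l.length - 4 := by omega
    rw [hm, List.foldl_map]
    rw [PySem.List.foldl_congr_mem _ _
        (fun (acc : List (List Int)) (k : Nat) =>
          if pvCond ((l.drop k).take 5) then acc ++ [(l.drop k).take 5] else acc) [] ?_]
    · rw [PySem.List.foldl_append_if]
      -- the trailing window
      have hn4 : ((l.length : Int) - 4) = ((l.length - 4 : Nat) : Int) := by omega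
      have hn1 : ((l.length : Int) - 1) = ((l.length - 1 : Nat) : Int) := by omega
      have hdrop : PySem.List.slice l (some ((l.length : Int) - 4)) none = l.drop (l.length - 4) := by
        rw [hn4, PySem.List.slice_from_natCast]
      have htake : (l.drop (l.length - 4)).take 5 = l.drop (l.length - 4) := by
        apply List.take_of_length_le
        simp [List.length_drop]
        omega
      have hd : PySem.List.pyGetD l ((l.length : Int) - 4) 0 - PySem.List.pyGetD l ((l.length : Int) - 1) 0 - 3
          = pvD (l.drop (l.length - 4)) := by
        rw [hn4, hn1, PySem.List.pyGetD_natCast, PySem.List.pyGetD_natCast, pv_q4 l hn]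
      rw [hd, hdrop]
      unfold pvF
      have hr : l.length - 3 = (l.length - 4) + 1 := by omega
      rw [hr, List.range_succ, List.filter_append, List.map_append]
      by_cases hc : pvCond (l.drop (l.length - 4)) = true
      · rw [if_pos ((pv_cond_iff _).mpr hc)]
        simp [hc, htake]
      · rw [if_neg (fun h => hc ((pv_cond_iff _).mp h))]
        simp [hc, htake]
    · intro acc k hk
      rw [List.mem_range] at hk
      simp only [zero_add]
      have hk5 : k + 5 ≤ l.length := by omega
      have hkz : k < (l.zip (l.drop 4)).length := by omega
      have hget : PySem.List.pyGetD (l.zip (l.drop 4)) (k : Int) ((0 : Int), (0 : Int))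
          = (l[k]'(by omega), l[k + 4]'(by omega)) := by
        rw [PySem.List.pyGetD_natCast, List.getD_eq_getElem _ _ hkz, List.getElem_zip,
            List.getElem_drop]
        congr 2
        omega
      simp only [hget]
      have hdd : l[k]'(by omega) - l[k + 4]'(by omega) - 4 = pvD ((l.drop k).take 5) := by
        rw [pv_q5 l k hk5, List.getD_eq_getElem l 0 (n := k) (by omega),
            List.getD_eq_getElem l 0 (n := k + 4) (by omega)]
      rw [pv_slice l k]
      by_cases hc : pvCond ((l.drop k).take 5) = true
      · have := (pv_cond_iff _).mpr hc
        rw [if_pos (by rw [hdd]; omega), if_pos hc]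
      · have : ¬ (pvD ((l.drop k).take 5) = 0 ∨ pvD ((l.drop k).take 5) = 1) := by
          intro h; exact hc ((pv_cond_iff _).mp h)
        rw [if_neg (by rw [hdd]; omega), if_neg hc]

-- ===== VERDICT =====
theorem detect_straights_spec : Claim_equal_detect_straights := by
  intro values _
  unfold Spec_detect_straights
  rw [pv_A_eq, pv_B_eq]
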